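-- pv_equiv track=rewrite | github.com/ervand7/Summary | Algorithms and data structures/Algorithms/Tasks/Leetcode/Easy/204. Special Positions in a Binary Matrix.py | num_special
-- ===== SOURCE A (Python) =====
-- from typing import List
--
-- def num_special(mat: List[List[int]]) -> int:
--     result = 0
--     for i in range(len(mat)):
--         for j in range(len(mat[i])):
--             if mat[i][j] == 1:
--                 if sum(mat[i]) == 1 and sum([mat[row][j] for row in range(len(mat))]) == 1:
--                     result += 1
--                     break
--
--     return result
-- ===== SOURCE B (Python) =====
-- def num_special(mat):
--     width = max((len(row) for row in mat), default=0)
--     col_sums = [sum(row[j] for row in mat if j < len(row)) for j in range(width)]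
--     return sum(1 for row in mat
--                if sum(row) == 1 and any(v == 1 and col_sums[j] == 1 for j, v in enumerate(row)))
-- ===== Notes on version B (the rewrite author's own statement) =====
-- stated objective: alternative
-- what changed: B precomputes all column sums once and tests each row against them in a single pass, instead of recomputing a full column scan inside the nested cell loop.
-- outside the precondition, e.g. on num_special([[1, -1, 1], [0]]): A returns 1, B returns 1
import Mathlib
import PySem

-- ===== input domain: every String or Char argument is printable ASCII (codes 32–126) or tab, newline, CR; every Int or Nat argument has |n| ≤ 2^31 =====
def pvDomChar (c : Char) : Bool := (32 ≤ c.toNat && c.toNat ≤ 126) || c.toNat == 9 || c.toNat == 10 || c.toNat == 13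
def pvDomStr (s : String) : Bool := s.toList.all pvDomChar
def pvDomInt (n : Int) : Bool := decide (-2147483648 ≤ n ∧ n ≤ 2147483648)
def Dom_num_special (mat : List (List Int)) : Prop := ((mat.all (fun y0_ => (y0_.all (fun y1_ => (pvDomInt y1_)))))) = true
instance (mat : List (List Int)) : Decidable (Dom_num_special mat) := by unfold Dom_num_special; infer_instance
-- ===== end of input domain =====

-- B precomputes every column sum once and then checks each row in one pass,
-- instead of A's full column scan inside the nested cell loop.

-- ===== PORT A =====
-- sum([mat[row][j] for row in range(len(mat))])
def pvAColSum (mat : List (List Int)) (j : Nat) : Int :=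
  ((List.range mat.length).map (fun r => (mat.getD r []).getD j 0)).sum

-- A's inner loop over j (the `break` makes a counted row contribute exactly 1 and stop)
def pvARow (mat : List (List Int)) (row : List Int) : List Nat → Int
  | [] => 0
  | j :: js =>
    if row.getD j 0 = 1 then
      if row.sum = 1 ∧ pvAColSum mat j = 1 then 1 else pvARow mat row js
    else pvARow mat row js

def num_special (mat : List (List Int)) : Int :=
  (List.range mat.length).foldl
    (fun result i =>
      result + pvARow mat (mat.getD i []) (List.range (mat.getD i []).length)) 0

-- ===== PORT B =====
def num_special_alt (mat : List (List Int)) : Int :=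
  let width := (mat.map List.length).foldl max 0
  let colSums := (List.range width).map
    (fun j => ((mat.filter (fun row => j < row.length)).map (fun row => row.getD j 0)).sum)
  (mat.countP (fun row =>
    row.sum == 1 && row.zipIdx.any (fun p => p.1 == 1 && colSums.getD p.2 0 == 1)) : Int)

-- ===== PRECONDITION & SPEC =====
-- Pre_ excludes matrices where some row of sum 1 has a 1 in a column that not every row
-- reaches: on such ragged inputs A's column scan mat[row][j] generally raises IndexError
-- (when an earlier break happens to save A it returns, and B returns the same value there).
def Pre_num_special (mat : List (List Int)) : Prop :=
  ∀ row ∈ mat, row.sum = 1 →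
    ∀ j < row.length, row.getD j 0 = 1 → ∀ r ∈ mat, j < r.length
instance (mat : List (List Int)) : Decidable (Pre_num_special mat) := by
  unfold Pre_num_special; infer_instance

def pvWitness_num_special : List (List Int) := [[1, 0], [0, 1]]

def Spec_num_special (mat : List (List Int)) (out : Int) : Prop := out = num_special_alt mat
instance (mat : List (List Int)) (out : Int) : Decidable (Spec_num_special mat out) := by
  unfold Spec_num_special; infer_instance

-- ===== CLAIM (what is proved, stated in full; the proofs are below) =====
def Claim_equal_num_special : Prop :=
  ∀ (mat : List (List Int)), Dom_num_special mat → Pre_num_special mat →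
    Spec_num_special mat (num_special mat)

-- ===== LEMMAS AND PROOFS =====

theorem map_range_getD_lists (l : List (List Int)) (f : List Int → Int) :
    (List.range l.length).map (fun i => f (l.getD i [])) = l.map f := by
  apply List.ext_getElem
  · simp
  · intro i h1 h2
    simp at h1
    simp [List.getD_eq_getElem?_getD, List.getElem?_eq_getElem (by simpa using h1)]

theorem pvAColSum_eq (mat : List (List Int)) (j : Nat) :
    pvAColSum mat j = (mat.map (fun row => row.getD j 0)).sum := by
  unfold pvAColSum
  rw [map_range_getD_lists mat (fun row => row.getD j 0)]

theorem length_le_width (mat : List (List Int)) (row : List Int) (h : row ∈ mat) :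
    row.length ≤ (mat.map List.length).foldl max 0 :=
  (PySem.List.le_foldl_max (mat.map List.length) 0).2 row.length
    (List.mem_map_of_mem h)

theorem zipIdx_any_iff (l : List Int) (p : Int × Nat → Bool) :
    l.zipIdx.any p = true ↔ ∃ i, ∃ _ : i < l.length, p (l[i], i) = true := by
  rw [List.any_eq_true]
  constructor
  · rintro ⟨⟨a, i⟩, h, hp⟩
    rw [List.mem_zipIdx_iff_getElem?, List.getElem?_eq_some_iff] at h
    obtain ⟨hi, he⟩ := h
    exact ⟨i, hi, by rw [he]; exact hp⟩
  · rintro ⟨i, h, hp⟩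
    exact ⟨(l[i], i), by rw [List.mem_zipIdx_iff_getElem?, List.getElem?_eq_getElem h], hp⟩

theorem pvARow_eq_ite (mat : List (List Int)) (row : List Int) (js : List Nat) :
    pvARow mat row js =
      if ∃ j ∈ js, row.getD j 0 = 1 ∧ row.sum = 1 ∧ pvAColSum mat j = 1 then 1 else 0 := by
  induction js with
  | nil => simp [pvARow]
  | cons j js ih =>
    simp only [pvARow]
    rw [ih]
    by_cases h1 : row.getD j 0 = 1
    · by_cases h2 : row.sum = 1 ∧ pvAColSum mat j = 1
      · rw [if_pos h1, if_pos h2, if_pos ⟨j, by simp, h1, h2⟩]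
      · rw [if_pos h1, if_neg h2]
        congr 1
        simp only [List.mem_cons, eq_iff_iff]
        constructor
        · rintro ⟨k, hk, hh⟩; exact ⟨k, Or.inr hk, hh⟩
        · rintro ⟨k, hk | hk, hh⟩
          · exact absurd hh.2 (by rw [hk]; exact h2)
          · exact ⟨k, hk, hh⟩
    · rw [if_neg h1]
      congr 1
      simp only [List.mem_cons, eq_iff_iff]
      constructor
      · rintro ⟨k, hk, hh⟩; exact ⟨k, Or.inr hk, hh⟩
      · rintro ⟨k, hk | hk, hh⟩
        · exact absurd hh.1 (by rw [hk]; exact h1)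
        · exact ⟨k, hk, hh⟩

-- under Pre_, B's filtered column sum at a 1-position equals A's full column sum
theorem colSum_filter_eq (mat : List (List Int)) (j : Nat)
    (hall : ∀ r ∈ mat, j < r.length) :
    ((mat.filter (fun row => j < row.length)).map (fun row => row.getD j 0)).sum
      = pvAColSum mat j := by
  rw [pvAColSum_eq, List.filter_eq_self.mpr (fun r hr => by simpa using hall r hr)]

-- the per-row predicate of B, for a row of mat, under Pre_
theorem row_pred_iff (mat : List (List Int)) (row : List Int) (hrow : row ∈ mat)
    (hpre : row.sum = 1 → ∀ j < row.length, row.getD j 0 = 1 → ∀ r ∈ mat, j < r.length) :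
    ((row.sum == 1 &&
        row.zipIdx.any (fun p => p.1 == 1 &&
          ((List.range ((mat.map List.length).foldl max 0)).map
            (fun j => ((mat.filter (fun r => j < r.length)).map (fun r => r.getD j 0)).sum)).getD p.2 0 == 1)) = true)
      ↔ (∃ j ∈ List.range row.length, row.getD j 0 = 1 ∧ row.sum = 1 ∧ pvAColSum mat j = 1) := by
  rw [Bool.and_eq_true, zipIdx_any_iff]
  have hw : row.length ≤ (mat.map List.length).foldl max 0 := length_le_width mat row hrow
  constructor
  · rintro ⟨hs, i, hi, hp⟩
    simp only [Bool.and_eq_true, beq_iff_eq] at hp hs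
    have h1 : row.getD i 0 = 1 := by
      simp [List.getD_eq_getElem?_getD, List.getElem?_eq_getElem hi, hp.1]
    refine ⟨i, by simpa using hi, h1, hs, ?_⟩
    have := hp.2
    rw [PySem.List.getD_map_range _ _ _ _ (lt_of_lt_of_le hi hw)] at this
    rwa [colSum_filter_eq mat i (hpre hs i hi h1)] at this
  · rintro ⟨j, hj, h1, h2, h3⟩
    have hj' : j < row.length := by simpa using hj
    refine ⟨by simpa using h2, j, hj', ?_⟩
    simp only [Bool.and_eq_true, beq_iff_eq]
    constructor
    · rw [List.getD_eq_getElem?_getD, List.getElem?_eq_getElem hj'] at h1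
      simpa using h1
    · rw [PySem.List.getD_map_range _ _ _ _ (lt_of_lt_of_le hj' hw)]
      rw [colSum_filter_eq mat j (hpre h2 j hj' h1)]
      exact h3

-- ===== VERDICT (by name: the statement is the Claim_ definition above) =====
theorem num_special_spec : Claim_equal_num_special := by
  intro mat _ hpre
  unfold Spec_num_special num_special num_special_alt
  rw [PySem.List.foldl_add, map_range_getD_lists mat
    (fun row => pvARow mat row (List.range row.length))]
  have hmap : (mat.map (fun row => pvARow mat row (List.range row.length)))
      = mat.map (fun row =>
          if (row.sum == 1 && row.zipIdx.any (fun p => p.1 == 1 &&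
              ((List.range ((mat.map List.length).foldl max 0)).map
                (fun j => ((mat.filter (fun r => j < r.length)).map (fun r => r.getD j 0)).sum)).getD p.2 0 == 1)) = true
          then (1 : Int) else 0) := by
    apply List.map_congr_left
    intro row hrow
    rw [pvARow_eq_ite]
    by_cases hex : ∃ j ∈ List.range row.length, row.getD j 0 = 1 ∧ row.sum = 1 ∧ pvAColSum mat j = 1
    · rw [if_pos hex, if_pos ((row_pred_iff mat row hrow (hpre row hrow)).mpr hex)]
    · rw [if_neg hex, if_neg (fun h => hex ((row_pred_iff mat row hrow (hpre row hrow)).mp h))]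
  rw [hmap, PySem.List.sum_map_ite_one_zero]
  simp
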